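-- pv_equiv track=rewrite | github.com/git4robot/PyKids | radix.py | from_redix
-- ===== SOURCE A (Python) =====
-- def from_redix(num, to_radix):
--       """
--       num ---------- The number for convert.
--       to_radix ---------- The radix to convert with DEC.
--       """
--       _list = list()
--       a = num
--       while a:
--             to = a % to_radix
--             a = (a - to) // to_radix
--             _list.append(str(to))
--       _list.reverse()
--       ret = "".join(_list)
--       return int(ret)
-- ===== SOURCE B (Python) =====
-- def from_redix(num, to_radix):
--       """
--       num ---------- The number for convert.
--       to_radix ---------- The radix to convert with DEC.
--       """
--       p = 1
--       while p * to_radix <= num: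
--             p *= to_radix
--       digits = ""
--       while p:
--             digits += str(num // p)
--             num %= p
--             p //= to_radix
--       return int(digits)
-- ===== Notes on version B (the rewrite author's own statement) =====
-- stated objective: alternative
-- what changed: Replaces A's least-significant-first while-loop with list append, reverse and join by a most-significant-first algorithm: first compute the largest power p of to_radix with p <= num, then extract digits front-to-back with num//p and num%=p, so no list, reverse or join is needed.
-- outside the precondition, e.g. on from_redix(-1, -2): A returns -1, B raises ValueError; on from_redix(0, 5): A raises ValueError, B returns 0
import Mathlib
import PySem

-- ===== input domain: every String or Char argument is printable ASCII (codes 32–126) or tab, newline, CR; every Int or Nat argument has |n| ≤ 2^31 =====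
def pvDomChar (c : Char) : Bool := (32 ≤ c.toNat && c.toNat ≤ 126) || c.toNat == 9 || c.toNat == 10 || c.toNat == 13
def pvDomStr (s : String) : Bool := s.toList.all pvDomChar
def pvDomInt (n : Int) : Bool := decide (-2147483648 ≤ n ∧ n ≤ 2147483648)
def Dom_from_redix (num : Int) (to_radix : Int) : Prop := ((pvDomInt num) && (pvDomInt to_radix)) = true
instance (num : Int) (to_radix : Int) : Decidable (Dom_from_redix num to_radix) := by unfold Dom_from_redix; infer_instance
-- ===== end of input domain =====

-- B replaces A's least-significant-first loop + list/reverse/join by a most-significant-first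
-- extraction using the largest radix power ≤ num (alternative decomposition, same cost).

-- ===== PORT A =====
-- while a: loop; fuel num.natAbs+1 only makes the recursion total (enough on Pre_,
-- where a strictly decreases); digit strings kept as List Char (PySem.Int.toChars = str).
def fromRedixLoopA (to_radix : Int) : Nat → Int → List (List Char) → List (List Char)
  | 0, _, acc => acc
  | f + 1, a, acc =>
    if a ≠ 0 then
      let t := PySem.Int.mod a to_radix
      fromRedixLoopA to_radix f (PySem.Int.floordiv (a - t) to_radix) (acc ++ [PySem.Int.toChars t])
    else acc

def from_redix (num : Int) (to_radix : Int) : Int :=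
  let l := fromRedixLoopA to_radix (num.natAbs + 1) num []
  -- _list.reverse(); ret = "".join(_list); return int(ret) — none (ValueError) excluded by Pre_
  (PySem.Int.ofChars? l.reverse.flatten).getD 0

-- ===== PORT B =====
-- while p * to_radix <= num: p *= to_radix  — fuel num.natAbs+1 suffices on Pre_
def altPowLoop (num to_radix : Int) : Nat → Int → Int
  | 0, p => p
  | f + 1, p => if p * to_radix ≤ num then altPowLoop num to_radix f (p * to_radix) else p

-- while p: digits += str(num // p); num %= p; p //= to_radix  — fuel as above
def altDigLoop (to_radix : Int) : Nat → Int → Int → List Char → List Char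
  | 0, _, _, s => s
  | f + 1, a, p, s =>
    if p ≠ 0 then
      altDigLoop to_radix f (PySem.Int.mod a p) (PySem.Int.floordiv p to_radix)
        (s ++ PySem.Int.toChars (PySem.Int.floordiv a p))
    else s

def from_redix_alt (num : Int) (to_radix : Int) : Int :=
  let p := altPowLoop num to_radix (num.natAbs + 1) 1
  -- return int(digits) — none (ValueError) excluded by Pre_
  (PySem.Int.ofChars? (altDigLoop to_radix (num.natAbs + 1) num p [])).getD 0

-- ===== PRECONDITION & SPEC =====
-- Pre_ excludes num ≤ 0 or to_radix ≤ 1: there A raises ValueError (int("") at num = 0, or an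
-- unparseable digit string for most negative radixes), raises ZeroDivisionError (to_radix = 0),
-- or loops forever (negative num with to_radix ≥ 2, or to_radix = 1); on the sporadic
-- negative-radix inputs whose digit string happens to parse (e.g. (-1, -2)) A returns an
-- accidental value on which B raises ValueError instead.
def Pre_from_redix (num : Int) (to_radix : Int) : Prop := 1 ≤ num ∧ 2 ≤ to_radix
instance (num : Int) (to_radix : Int) : Decidable (Pre_from_redix num to_radix) := by
  unfold Pre_from_redix; infer_instance

def pvWitness_from_redix : Int × Int := (5, 2)

def Spec_from_redix (num : Int) (to_radix : Int) (out : Int) : Prop := out = from_redix_alt num to_radix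
instance (num : Int) (to_radix : Int) (out : Int) : Decidable (Spec_from_redix num to_radix out) := by
  unfold Spec_from_redix; infer_instance

-- ===== CLAIM (what is proved, stated in full; the proofs are below) =====
def Claim_equal_from_redix : Prop := ∀ (num : Int) (to_radix : Int), Dom_from_redix num to_radix → Pre_from_redix num to_radix → Spec_from_redix num to_radix (from_redix num to_radix)

-- ===== LEMMAS AND PROOFS =====

-- canonical MSB-first digit string of a (proof-side; fuel-totalised like the ports)
def canonDigits (r : Int) : Nat → Int → List Char
  | 0, _ => []
  | f + 1, a =>
    if a ≠ 0 then
      canonDigits r f (PySem.Int.floordiv (a - PySem.Int.mod a r) r) ++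
        PySem.Int.toChars (PySem.Int.mod a r)
    else []

-- the k+1 low-order digits of a, MSB first (proof-side)
def padDigits (r : Int) : Nat → Int → List Char
  | 0, a => PySem.Int.toChars a
  | k + 1, a => padDigits r k (a / r) ++ PySem.Int.toChars (a % r)

-- one loop step of A: (a - a % r) // r is exactly a / r, which stays nonnegative and shrinks
lemma fromRedix_step (a r : Int) (ha : 0 < a) (hr : 2 ≤ r) :
    PySem.Int.floordiv (a - PySem.Int.mod a r) r = a / r ∧ 0 ≤ a / r ∧ a / r < a := by
  have hrpos : (0:Int) < r := by omega
  have hmod : PySem.Int.mod a r = a % r := PySem.Int.mod_eq_emod_of_pos hrpos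
  have hsub : a - a % r = r * (a / r) := by
    have := Int.mul_ediv_add_emod a r; omega
  have hfd : PySem.Int.floordiv (a - PySem.Int.mod a r) r = a / r := by
    rw [hmod, hsub, PySem.Int.floordiv_eq_ediv_of_pos hrpos,
      Int.mul_ediv_cancel_left _ (by omega : r ≠ 0)]
  exact ⟨hfd, Int.ediv_nonneg (by omega) (by omega), by rw [Int.ediv_lt_iff_lt_mul (by omega)]; nlinarith⟩

lemma canonDigits_zero (r : Int) : ∀ f, canonDigits r f 0 = [] := by
  intro f; cases f <;> simp [canonDigits]

lemma altDigLoop_zero (r : Int) : ∀ f a s, altDigLoop r f a 0 s = s := by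
  intro f a s; cases f <;> simp [altDigLoop]

-- A's loop invariant: reversed-and-joined digit list = canonical digits ++ what was accumulated
lemma loopA_eq (r : Int) (hr : 2 ≤ r) :
    ∀ (f : Nat) (a : Int) (acc : List (List Char)), 0 ≤ a → a.natAbs < f →
      (fromRedixLoopA r f a acc).reverse.flatten = canonDigits r f a ++ acc.reverse.flatten := by
  intro f
  induction f with
  | zero => intro a acc _ hf; omega
  | succ f ih =>
    intro a acc ha hf
    by_cases h0 : a = 0
    · subst h0; simp [fromRedixLoopA, canonDigits]
    · have hstep := fromRedix_step a r (by omega) hr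
      simp only [fromRedixLoopA, canonDigits, if_pos h0]
      rw [ih _ _ (by rw [hstep.1]; exact hstep.2.1) (by rw [hstep.1]; omega)]
      simp

-- canonical digits of a with r^k ≤ a < r^(k+1) are exactly its k+1 digits
lemma canon_pad (r : Int) (hr : 2 ≤ r) :
    ∀ (k : Nat) (a : Int) (f : Nat), 0 < a → r ^ k ≤ a → a < r ^ (k + 1) → k < f →
      canonDigits r f a = padDigits r k a := by
  intro k
  induction k with
  | zero =>
    intro a f ha h1 h2 hf
    obtain ⟨f, rfl⟩ : ∃ g, f = g + 1 := ⟨f - 1, by omega⟩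
    rw [pow_one] at h2
    have hrpos : (0:Int) < r := by omega
    have hmod : PySem.Int.mod a r = a := by
      rw [PySem.Int.mod_eq_emod_of_pos hrpos, Int.emod_eq_of_lt (by omega) h2]
    simp only [canonDigits, if_pos (show a ≠ 0 by omega), hmod, sub_self]
    rw [show PySem.Int.floordiv 0 r = 0 by
        rw [PySem.Int.floordiv_eq_ediv_of_pos hrpos, Int.zero_ediv],
      canonDigits_zero]
    simp [padDigits]
  | succ k ih =>
    intro a f ha h1 h2 hf
    obtain ⟨f, rfl⟩ : ∃ g, f = g + 1 := ⟨f - 1, by omega⟩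
    have hrpos : (0:Int) < r := by omega
    have hstep := fromRedix_step a r ha hr
    simp only [canonDigits, if_pos (show a ≠ 0 by omega)]
    rw [hstep.1]
    have hb1 : r ^ k ≤ a / r := (Int.le_ediv_iff_mul_le hrpos).2 (by rw [← pow_succ]; exact h1)
    have hb2 : a / r < r ^ (k + 1) := (Int.ediv_lt_iff_lt_mul hrpos).2 (by rw [← pow_succ]; exact h2)
    have hapos : 0 < a / r := lt_of_lt_of_le (pow_pos hrpos k) hb1
    rw [ih (a / r) f hapos hb1 hb2 (by omega),
      PySem.Int.mod_eq_emod_of_pos hrpos]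
    rfl

-- split off the leading digit: k+2 digits of a = a / r^(k+1), then the k+1 digits of a % r^(k+1)
lemma pad_split (r : Int) (hr : 2 ≤ r) :
    ∀ (k : Nat) (a : Int), 0 ≤ a →
      padDigits r (k + 1) a =
        PySem.Int.toChars (a / r ^ (k + 1)) ++ padDigits r k (a % r ^ (k + 1)) := by
  intro k
  induction k with
  | zero => intro a ha; simp [padDigits, pow_one]
  | succ k ih =>
    intro a ha
    have hrpos : (0:Int) < r := by omega
    have hd : r ^ (k + 2) = r * r ^ (k + 1) := by rw [pow_succ']
    have e1 : a / r / r ^ (k + 1) = a / r ^ (k + 2) := by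
      rw [Int.ediv_ediv_of_nonneg (by omega), ← hd]
    have e2 : (a % r ^ (k + 2)) % r = a % r :=
      Int.emod_emod_of_dvd a (dvd_pow_self r (by omega))
    have e3 : (a % r ^ (k + 2)) / r = a / r % r ^ (k + 1) := by
      have h1 : a % r ^ (k + 2) = a + r * (-(r ^ (k + 1) * (a / r ^ (k + 2)))) := by
        rw [Int.emod_def, hd]; ring
      rw [h1, Int.add_mul_ediv_left a _ (by omega : r ≠ 0), Int.emod_def, e1]; ring
    show padDigits r (k + 1) (a / r) ++ PySem.Int.toChars (a % r) = _
    rw [ih (a / r) (Int.ediv_nonneg ha (by omega))]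
    show _ = PySem.Int.toChars (a / r ^ (k + 2)) ++
        (padDigits r k ((a % r ^ (k + 2)) / r) ++ PySem.Int.toChars ((a % r ^ (k + 2)) % r))
    rw [e1, e2, e3, List.append_assoc]

-- B's digit loop starting at p = r^k emits exactly the k+1 digits of a
lemma digLoop_pad (r : Int) (hr : 2 ≤ r) :
    ∀ (k : Nat) (f : Nat) (a : Int) (s : List Char), 0 ≤ a → a < r ^ (k + 1) → k < f →
      altDigLoop r f a (r ^ k) s = s ++ padDigits r k a := by
  intro k
  induction k with
  | zero =>
    intro f a s ha h2 hf
    obtain ⟨f, rfl⟩ : ∃ g, f = g + 1 := ⟨f - 1, by omega⟩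
    have hrpos : (0:Int) < r := by omega
    simp only [altDigLoop, pow_zero, if_pos (one_ne_zero (α := Int))]
    rw [show PySem.Int.mod a 1 = 0 by
        rw [PySem.Int.mod_eq_emod_of_pos one_pos, Int.emod_one],
      show PySem.Int.floordiv 1 r = 0 by
        rw [PySem.Int.floordiv_eq_ediv_of_pos hrpos, Int.ediv_eq_zero_of_lt one_pos.le (by omega)],
      show PySem.Int.floordiv a 1 = a by
        rw [PySem.Int.floordiv_eq_ediv_of_pos one_pos, Int.ediv_one],
      altDigLoop_zero]
    rfl
  | succ k ih =>
    intro f a s ha h2 hf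
    obtain ⟨f, rfl⟩ : ∃ g, f = g + 1 := ⟨f - 1, by omega⟩
    have hrpos : (0:Int) < r := by omega
    have hpow : (0:Int) < r ^ (k + 1) := pow_pos hrpos _
    simp only [altDigLoop, if_pos (show r ^ (k + 1) ≠ 0 by positivity)]
    rw [PySem.Int.mod_eq_emod_of_pos hpow,
      PySem.Int.floordiv_eq_ediv_of_pos hrpos,
      PySem.Int.floordiv_eq_ediv_of_pos hpow,
      show r ^ (k + 1) / r = r ^ k by
        rw [pow_succ', Int.mul_ediv_cancel_left _ (by omega : r ≠ 0)]]
    rw [ih f (a % r ^ (k + 1)) _ (Int.emod_nonneg a (by positivity)) (Int.emod_lt_of_pos a hpow)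
      (by omega)]
    rw [pad_split r hr k a ha, List.append_assoc]

-- B's power loop lands on the largest r^k ≤ num (given enough fuel)
lemma altPow_spec (num r : Int) (hr : 2 ≤ r) :
    ∀ (f j : Nat), r ^ j ≤ num → num < r ^ (j + f) →
      ∃ k : Nat, altPowLoop num r f (r ^ j) = r ^ k ∧ r ^ k ≤ num ∧ num < r ^ (k + 1) := by
  intro f
  induction f with
  | zero => intro j h1 h2; rw [Nat.add_zero] at h2; omega
  | succ f ih =>
    intro j h1 h2
    simp only [altPowLoop]
    by_cases hc : r ^ j * r ≤ num
    · rw [if_pos hc, ← pow_succ]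
      exact ih (j + 1) (by rw [pow_succ]; exact hc)
        (by rw [show j + 1 + f = j + (f + 1) from by omega]; exact h2)
    · rw [if_neg hc]
      exact ⟨j, rfl, h1, by rw [pow_succ]; omega⟩

lemma num_lt_pow (num r : Int) (h1 : 1 ≤ num) (hr : 2 ≤ r) : num < r ^ (num.natAbs + 1) := by
  have e : ((num.natAbs : Int)) = num := Int.natAbs_of_nonneg (by omega)
  calc num = (num.natAbs : Int) := e.symm
    _ < 2 ^ (num.natAbs + 1) := by
        exact_mod_cast Nat.lt_of_lt_of_le Nat.lt_two_pow_self
          (Nat.pow_le_pow_right (by omega) (by omega))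
    _ ≤ r ^ (num.natAbs + 1) := pow_le_pow_left₀ (by omega) (by omega) _

lemma k_lt_fuel (num r : Int) (k : Nat) (h1 : 1 ≤ num) (hr : 2 ≤ r)
    (hk : r ^ k ≤ num) : k < num.natAbs + 1 := by
  have h2 : (2:Int) ^ k ≤ num := le_trans (pow_le_pow_left₀ (by omega) hr k) hk
  have h3 : (2:Nat) ^ k ≤ num.natAbs := by
    have e : ((num.natAbs : Int)) = num := Int.natAbs_of_nonneg (by omega)
    exact_mod_cast e ▸ h2
  exact Nat.lt_succ_of_lt (Nat.lt_of_lt_of_le Nat.lt_two_pow_self h3)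


-- ===== VERDICT (by name: the statement is the Claim_ definition above) =====
theorem from_redix_spec : Claim_equal_from_redix := by
  intro num r _ hpre
  obtain ⟨h1, hr⟩ := hpre
  unfold Spec_from_redix from_redix from_redix_alt
  simp only []
  obtain ⟨k, hP, hk1, hk2⟩ := altPow_spec num r hr (num.natAbs + 1) 0
    (by simpa using h1) (by simpa using num_lt_pow num r h1 hr)
  have hkf : k < num.natAbs + 1 := k_lt_fuel num r k h1 hr hk1
  rw [loopA_eq r hr (num.natAbs + 1) num [] (by omega) (by omega)]
  rw [show (1:Int) = r ^ 0 from (pow_zero r).symm, hP]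
  rw [digLoop_pad r hr k (num.natAbs + 1) num [] (by omega) hk2 hkf]
  rw [canon_pad r hr k num (num.natAbs + 1) (by omega) hk1 hk2 hkf]
  simp
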